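-- pv_equiv track=rewrite | github.com/zmetz1/zoe-group-site | scripts/telar/iiif_metadata.py | extract_language_map_value
-- ===== SOURCE A (Python) =====
-- def extract_language_map_value(language_map, site_language='en'):
--     """
--     Extract value from IIIF v3.0 language map with fallback logic.
--
--     Fallback order:
--     1. Site's telar_language (e.g., 'es' for Spanish sites)
--     2. English ('en')
--     3. Unlabeled content ('none')
--     4. First available language
--
--     Args:
--         language_map: Dict with language codes as keys, arrays as values
--         site_language: Preferred language code
--
--     Returns:
--         str: Extracted value or empty string
--     """
--     if not isinstance(language_map, dict):
--         return ''
--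
--     # Try site language
--     if site_language in language_map:
--         values = language_map[site_language]
--         if isinstance(values, list) and len(values) > 0:
--             return str(values[0])
--
--     # Try English
--     if 'en' in language_map:
--         values = language_map['en']
--         if isinstance(values, list) and len(values) > 0:
--             return str(values[0])
--
--     # Try unlabeled content
--     if 'none' in language_map:
--         values = language_map['none']
--         if isinstance(values, list) and len(values) > 0:
--             return str(values[0])
--
--     # Use first available language
--     for lang, values in language_map.items():
--         if isinstance(values, list) and len(values) > 0:
--             return str(values[0])
--
--     return ''
-- ===== SOURCE B (Python) =====
-- def extract_language_map_value(language_map, site_language='en'):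
--     if not isinstance(language_map, dict):
--         return ''
--     # Single pass: record the first nonempty value seen for each priority slot
--     # (0 = site language, 1 = 'en', 2 = 'none', 3 = any other language),
--     # then return the value in the best filled slot.
--     best = [None, None, None, None]
--     for lang, values in language_map.items():
--         if isinstance(values, list) and len(values) > 0:
--             if lang == site_language:
--                 slot = 0
--             elif lang == 'en':
--                 slot = 1
--             elif lang == 'none':
--                 slot = 2
--             else:
--                 slot = 3
--             if best[slot] is None:
--                 best[slot] = str(values[0])
--     for v in best:
--         if v is not None:
--             return v
--     return ''
-- ===== Notes on version B (the rewrite author's own statement) =====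
-- stated objective: alternative
-- what changed: Replaces A's staged dict lookups (site language, then 'en', then 'none', then a final items() sweep) with a single pass over the items that records the first nonempty value per priority slot and then picks the best filled slot.
import Mathlib
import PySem

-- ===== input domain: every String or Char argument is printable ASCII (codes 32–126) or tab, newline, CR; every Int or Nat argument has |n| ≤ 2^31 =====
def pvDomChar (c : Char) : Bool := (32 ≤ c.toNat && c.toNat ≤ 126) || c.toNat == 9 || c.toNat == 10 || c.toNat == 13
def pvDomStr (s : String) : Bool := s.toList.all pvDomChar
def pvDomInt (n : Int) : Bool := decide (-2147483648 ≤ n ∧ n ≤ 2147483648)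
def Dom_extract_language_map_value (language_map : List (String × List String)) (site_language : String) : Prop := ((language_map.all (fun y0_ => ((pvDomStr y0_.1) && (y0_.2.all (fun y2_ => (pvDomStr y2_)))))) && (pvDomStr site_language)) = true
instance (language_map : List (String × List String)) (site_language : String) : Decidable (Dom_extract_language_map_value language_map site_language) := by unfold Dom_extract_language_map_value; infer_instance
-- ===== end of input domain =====

-- B replaces A's staged dict lookups with one pass over the items recording the first
-- nonempty value per priority slot, then picking the best filled slot (alternative algorithm).


-- ===== PORT A =====
-- dict lookup (first match; keys are unique under Pre_, as in a Python dict)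
def pvLookup (language_map : List (String × List String)) (k : String) : Option (List String) :=
  match language_map with
  | [] => none
  | (k', vs) :: rest => if k' = k then some vs else pvLookup rest k

-- A's final 'for lang, values in language_map.items()' loop
def pvFirstAvailable (language_map : List (String × List String)) : String :=
  match language_map with
  | [] => ""
  | (_, vs) :: rest =>
    match vs with
    | v :: _ => v
    | [] => pvFirstAvailable rest

def extract_language_map_value (language_map : List (String × List String)) (site_language : String) : String :=
  match pvLookup language_map site_language with
  | some (v :: _) => v
  | _ =>
    match pvLookup language_map "en" with
    | some (v :: _) => v
    | _ =>
      match pvLookup language_map "none" with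
      | some (v :: _) => v
      | _ => pvFirstAvailable language_map

-- ===== PORT B =====
-- Source B's slot assignment (the if/elif chain)
def pvSlot (lang sl : String) : Nat :=
  if lang = sl then 0 else if lang = "en" then 1 else if lang = "none" then 2 else 3

-- Source B's single loop: state = the 'best' array of four Option slots
def pvScan (items : List (String × List String)) (sl : String)
    (st : Option String × Option String × Option String × Option String) :
    Option String × Option String × Option String × Option String :=
  match items with
  | [] => st
  | (lang, vs) :: rest =>
    match vs with
    | [] => pvScan rest sl st
    | v :: _ =>
      let j := pvSlot lang sl
      let st' :=
        if j = 0 then (if st.1 = none then (some v, st.2.1, st.2.2.1, st.2.2.2) else st)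
        else if j = 1 then (if st.2.1 = none then (st.1, some v, st.2.2.1, st.2.2.2) else st)
        else if j = 2 then (if st.2.2.1 = none then (st.1, st.2.1, some v, st.2.2.2) else st)
        else (if st.2.2.2 = none then (st.1, st.2.1, st.2.2.1, some v) else st)
      pvScan rest sl st'

-- Source B's final 'for v in best' loop
def pvFirstSome (xs : List (Option String)) : String :=
  match xs with
  | [] => ""
  | none :: rest => pvFirstSome rest
  | some v :: _ => v

def extract_language_map_value_alt (language_map : List (String × List String)) (site_language : String) : String :=
  let st := pvScan language_map site_language (none, none, none, none)
  pvFirstSome [st.1, st.2.1, st.2.2.1, st.2.2.2]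

-- ===== PRECONDITION & SPEC =====
-- Pre_ requires distinct keys: the Python argument is a dict, which cannot hold duplicate keys,
-- so a duplicate-key association list corresponds to no Python input.
def Pre_extract_language_map_value (language_map : List (String × List String)) (site_language : String) : Prop :=
  (language_map.map Prod.fst).Nodup
instance (language_map : List (String × List String)) (site_language : String) : Decidable (Pre_extract_language_map_value language_map site_language) := by unfold Pre_extract_language_map_value; infer_instance

def pvWitness_extract_language_map_value : (List (String × List String)) × String :=
  ([("es", []), ("none", ["hola"])], "es")

def Spec_extract_language_map_value (language_map : List (String × List String)) (site_language : String) (out : String) : Prop := out = extract_language_map_value_alt language_map site_language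
instance (language_map : List (String × List String)) (site_language : String) (out : String) : Decidable (Spec_extract_language_map_value language_map site_language out) := by unfold Spec_extract_language_map_value; infer_instance

-- ===== CLAIM (what is proved, stated in full; the proofs are below) =====
def Claim_equal_extract_language_map_value : Prop := ∀ (language_map : List (String × List String)) (site_language : String), Dom_extract_language_map_value language_map site_language → Pre_extract_language_map_value language_map site_language → Spec_extract_language_map_value language_map site_language (extract_language_map_value language_map site_language)

-- ===== LEMMAS AND PROOFS =====

-- proof-side: first nonempty value among entries assigned slot i
def pvFirstSlot (lm : List (String × List String)) (sl : String) (i : Nat) : Option String :=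
  match lm with
  | [] => none
  | (k, vs) :: rest =>
    match vs with
    | [] => pvFirstSlot rest sl i
    | v :: _ => if pvSlot k sl = i then some v else pvFirstSlot rest sl i

theorem pvScan_eq (lm : List (String × List String)) (sl : String) :
    ∀ a b c d, pvScan lm sl (a, b, c, d) =
      (a.or (pvFirstSlot lm sl 0), b.or (pvFirstSlot lm sl 1),
       c.or (pvFirstSlot lm sl 2), d.or (pvFirstSlot lm sl 3)) := by
  induction lm with
  | nil => intro a b c d; simp [pvScan, pvFirstSlot]
  | cons p rest ih =>
    intro a b c d
    obtain ⟨k, vs⟩ := p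
    cases vs with
    | nil => simpa [pvScan, pvFirstSlot] using ih a b c d
    | cons v t =>
      by_cases h0 : k = sl
      · subst h0; cases a <;> simp [pvScan, pvFirstSlot, pvSlot, ih]
      · by_cases h1 : k = "en"
        · subst h1; cases b <;> simp [pvScan, pvFirstSlot, pvSlot, h0, ih]
        · by_cases h2 : k = "none"
          · subst h2; cases c <;> simp [pvScan, pvFirstSlot, pvSlot, h0, ih]
          · cases d <;> simp [pvScan, pvFirstSlot, pvSlot, h0, h1, h2, ih]

theorem pvMem_lookup (lm : List (String × List String)) (k : String) (vs : List String)
    (hnd : (lm.map Prod.fst).Nodup) (h : (k, vs) ∈ lm) : pvLookup lm k = some vs := by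
  induction lm with
  | nil => simp at h
  | cons p rest ih =>
    obtain ⟨k', vs'⟩ := p
    simp only [List.map_cons, List.nodup_cons, List.mem_map] at hnd
    rcases List.mem_cons.mp h with heq | hmem
    · cases heq; simp [pvLookup]
    · have hk : k' ≠ k := by
        rintro rfl
        exact hnd.1 ⟨_, hmem, rfl⟩
      simp [pvLookup, hk]; exact ih hnd.2 hmem

theorem pvFirstSlot_none (lm : List (String × List String)) (sl : String) (i : Nat)
    (h : ∀ k vs, (k, vs) ∈ lm → vs ≠ [] → pvSlot k sl ≠ i) : pvFirstSlot lm sl i = none := by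
  induction lm with
  | nil => rfl
  | cons p rest ih =>
    obtain ⟨k, vs⟩ := p
    have ih' := ih fun k' vs' hm => h k' vs' (List.mem_cons_of_mem _ hm)
    cases vs with
    | nil => simpa [pvFirstSlot] using ih'
    | cons v t =>
      have := h k (v :: t) (List.mem_cons_self) (by simp)
      simp [pvFirstSlot, this, ih']

-- when slot i is exactly "key = t", pvFirstSlot is the (unique) lookup of t
theorem pvFirstSlot_key (lm : List (String × List String)) (sl t : String) (i : Nat)
    (hnd : (lm.map Prod.fst).Nodup) (hiff : ∀ k, pvSlot k sl = i ↔ k = t) :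
    pvFirstSlot lm sl i =
      (match pvLookup lm t with | some (v :: _) => some v | _ => none) := by
  induction lm with
  | nil => rfl
  | cons p rest ih =>
    obtain ⟨k, vs⟩ := p
    simp only [List.map_cons, List.nodup_cons, List.mem_map] at hnd
    by_cases hk : k = t
    · subst hk
      cases vs with
      | cons v u => simp [pvFirstSlot, pvLookup, (hiff k).mpr rfl]
      | nil =>
        have hnone : pvFirstSlot rest sl i = none := by
          apply pvFirstSlot_none
          intro k' vs' hm _ hslot
          have : k' = k := (hiff k').mp hslot
          subst this
          exact hnd.1 ⟨(k', vs'), hm, rfl⟩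
        simp [pvFirstSlot, pvLookup, hnone]
    · have hslot : pvSlot k sl ≠ i := fun h => hk ((hiff k).mp h)
      cases vs with
      | cons v u => simp [pvFirstSlot, pvLookup, hk, hslot, ih hnd.2]
      | nil => simp [pvFirstSlot, pvLookup, hk, ih hnd.2]

-- when every nonempty entry falls in slot 3, A's final sweep equals slot 3's value
theorem pvFirstAvailable_eq (lm : List (String × List String)) (sl : String)
    (h : ∀ k vs, (k, vs) ∈ lm → vs ≠ [] → pvSlot k sl = 3) :
    pvFirstAvailable lm = (pvFirstSlot lm sl 3).getD "" := by
  induction lm with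
  | nil => rfl
  | cons p rest ih =>
    obtain ⟨k, vs⟩ := p
    have ih' := ih fun k' vs' hm => h k' vs' (List.mem_cons_of_mem _ hm)
    cases vs with
    | nil => simpa [pvFirstAvailable, pvFirstSlot] using ih'
    | cons v t =>
      have := h k (v :: t) (List.mem_cons_self) (by simp)
      simp [pvFirstAvailable, pvFirstSlot, this]

-- fail-state helper: if a key's lookup yields no nonempty list (and keys are unique),
-- no nonempty entry carries that key
theorem pvFail_empty (lm : List (String × List String)) (t : String)
    (hnd : (lm.map Prod.fst).Nodup) (ht : ∀ v u, pvLookup lm t ≠ some (v :: u)) :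
    ∀ vs, (t, vs) ∈ lm → vs = [] := by
  intro vs hm
  cases vs with
  | nil => rfl
  | cons v u => exact absurd (pvMem_lookup lm t (v :: u) hnd hm) (ht v u)

-- stage 3: all three preferred lookups failed
theorem pvStage3 (lm : List (String × List String)) (sl : String)
    (hnd : (lm.map Prod.fst).Nodup)
    (hsl : ∀ v u, pvLookup lm sl ≠ some (v :: u))
    (hen : ∀ v u, pvLookup lm "en" ≠ some (v :: u))
    (hno : ∀ v u, pvLookup lm "none" ≠ some (v :: u)) :
    pvFirstAvailable lm = pvFirstSome [pvFirstSlot lm sl 3] := by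
  have h3 : ∀ k vs, (k, vs) ∈ lm → vs ≠ [] → pvSlot k sl = 3 := by
    intro k vs hm hne
    have hks : k ≠ sl := fun h => hne (pvFail_empty lm sl hnd hsl vs (h ▸ hm))
    have hke : k ≠ "en" := fun h => hne (pvFail_empty lm "en" hnd hen vs (h ▸ hm))
    have hkn : k ≠ "none" := fun h => hne (pvFail_empty lm "none" hnd hno vs (h ▸ hm))
    simp [pvSlot, hks, hke, hkn]
  rw [pvFirstAvailable_eq lm sl h3]
  cases h : pvFirstSlot lm sl 3 <;> simp [pvFirstSome]

-- stage 2: site-language and 'en' lookups failed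
theorem pvStage2 (lm : List (String × List String)) (sl : String)
    (hnd : (lm.map Prod.fst).Nodup)
    (hsl : ∀ v u, pvLookup lm sl ≠ some (v :: u))
    (hen : ∀ v u, pvLookup lm "en" ≠ some (v :: u)) :
    (match pvLookup lm "none" with
     | some (v :: _) => v
     | _ => pvFirstAvailable lm) =
    pvFirstSome [pvFirstSlot lm sl 2, pvFirstSlot lm sl 3] := by
  by_cases hns : sl = "none"
  · have hF2 : pvFirstSlot lm sl 2 = none := by
      apply pvFirstSlot_none
      intro k vs _ _; subst hns; unfold pvSlot; split_ifs <;> simp_all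
    cases h : pvLookup lm "none" with
    | some vs =>
      cases vs with
      | cons v u => exact absurd h (hns ▸ hsl v u)
      | nil => simp [hF2, pvFirstSome, pvStage3 lm sl hnd hsl hen (hns ▸ hsl)]
    | none => simp [hF2, pvFirstSome, pvStage3 lm sl hnd hsl hen (hns ▸ hsl)]
  · have hF2 : pvFirstSlot lm sl 2 =
        (match pvLookup lm "none" with | some (v :: _) => some v | _ => none) := by
      apply pvFirstSlot_key lm sl "none" 2 hnd
      intro k; unfold pvSlot; split_ifs <;> simp_all
    cases h : pvLookup lm "none" with
    | some vs =>
      cases vs with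
      | cons v u => simp [hF2, h, pvFirstSome]
      | nil =>
        have hno : ∀ v u, pvLookup lm "none" ≠ some (v :: u) := by simp [h]
        simp [hF2, h, pvFirstSome, pvStage3 lm sl hnd hsl hen hno]
    | none =>
      have hno : ∀ v u, pvLookup lm "none" ≠ some (v :: u) := by simp [h]
      simp [hF2, h, pvFirstSome, pvStage3 lm sl hnd hsl hen hno]

-- stage 1: site-language lookup failed
theorem pvStage1 (lm : List (String × List String)) (sl : String)
    (hnd : (lm.map Prod.fst).Nodup)
    (hsl : ∀ v u, pvLookup lm sl ≠ some (v :: u)) :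
    (match pvLookup lm "en" with
     | some (v :: _) => v
     | _ =>
       match pvLookup lm "none" with
       | some (v :: _) => v
       | _ => pvFirstAvailable lm) =
    pvFirstSome [pvFirstSlot lm sl 1, pvFirstSlot lm sl 2, pvFirstSlot lm sl 3] := by
  by_cases hes : sl = "en"
  · have hF1 : pvFirstSlot lm sl 1 = none := by
      apply pvFirstSlot_none
      intro k vs _ _; subst hes; unfold pvSlot; split_ifs <;> simp_all
    cases h : pvLookup lm "en" with
    | some vs =>
      cases vs with
      | cons v u => exact absurd h (hes ▸ hsl v u)
      | nil => simp [hF1, pvFirstSome, pvStage2 lm sl hnd hsl (hes ▸ hsl)]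
    | none => simp [hF1, pvFirstSome, pvStage2 lm sl hnd hsl (hes ▸ hsl)]
  · have hF1 : pvFirstSlot lm sl 1 =
        (match pvLookup lm "en" with | some (v :: _) => some v | _ => none) := by
      apply pvFirstSlot_key lm sl "en" 1 hnd
      intro k; unfold pvSlot; split_ifs <;> simp_all
    cases h : pvLookup lm "en" with
    | some vs =>
      cases vs with
      | cons v u => simp [hF1, h, pvFirstSome]
      | nil =>
        have hen : ∀ v u, pvLookup lm "en" ≠ some (v :: u) := by simp [h]
        simp [hF1, h, pvFirstSome, pvStage2 lm sl hnd hsl hen]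
    | none =>
      have hen : ∀ v u, pvLookup lm "en" ≠ some (v :: u) := by simp [h]
      simp [hF1, h, pvFirstSome, pvStage2 lm sl hnd hsl hen]

-- ===== VERDICT (by name: the statement is the Claim_ definition above) =====
theorem extract_language_map_value_spec : Claim_equal_extract_language_map_value := by
  intro lm sl _ hnd
  unfold Spec_extract_language_map_value extract_language_map_value extract_language_map_value_alt
  simp only [pvScan_eq lm sl none none none none, Option.none_or]
  have hF0 : pvFirstSlot lm sl 0 =
      (match pvLookup lm sl with | some (v :: _) => some v | _ => none) := by
    apply pvFirstSlot_key lm sl sl 0 hnd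
    intro k; unfold pvSlot; split_ifs <;> simp_all
  cases h0 : pvLookup lm sl with
  | some vs0 =>
    cases vs0 with
    | cons v _ => simp [hF0, h0, pvFirstSome]
    | nil =>
      have hsl : ∀ v u, pvLookup lm sl ≠ some (v :: u) := by simp [h0]
      simp [hF0, h0, pvFirstSome, pvStage1 lm sl hnd hsl]
  | none =>
    have hsl : ∀ v u, pvLookup lm sl ≠ some (v :: u) := by simp [h0]
    simp [hF0, h0, pvFirstSome, pvStage1 lm sl hnd hsl]
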